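-- pv_equiv track=rewrite | github.com/Abstract-X/telebox | telebox/telegram_bot/utils.py | get_chat_id_without_prefix
-- ===== SOURCE A (Python) =====
-- def get_chat_id_without_prefix(id_: int) -> int:
--     if id_ <= -100_0:
--         id_with_prefix = id_
--         multiplier = 1
--
--         while id_with_prefix != -100:
--             id_with_prefix = -(id_with_prefix // -10)
--             multiplier *= 10
--
--             if not id_with_prefix:
--                 break
--         else:
--             return -100 * multiplier - id_
--
--     return id_
-- ===== SOURCE B (Python) =====
-- def get_chat_id_without_prefix(id_: int) -> int:
--     if id_ <= -1000:
--         n = -id_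
--         p = 10 ** (len(str(n)) - 3)
--         head, rest = divmod(n, p)
--         if head == 100:
--             return rest
--     return id_
-- ===== Notes on version B (the rewrite author's own statement) =====
-- stated objective: idiomatic
-- what changed: A strips digits one at a time with a floor-division loop while growing a multiplier until the supergroup marker value appears; B has no digit loop: it reads the digit count off str(-id_), forms the single aligned power of ten with an exponentiation, and decides with one divmod whether the leading digits form the marker, returning the remainder.
import Mathlib
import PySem

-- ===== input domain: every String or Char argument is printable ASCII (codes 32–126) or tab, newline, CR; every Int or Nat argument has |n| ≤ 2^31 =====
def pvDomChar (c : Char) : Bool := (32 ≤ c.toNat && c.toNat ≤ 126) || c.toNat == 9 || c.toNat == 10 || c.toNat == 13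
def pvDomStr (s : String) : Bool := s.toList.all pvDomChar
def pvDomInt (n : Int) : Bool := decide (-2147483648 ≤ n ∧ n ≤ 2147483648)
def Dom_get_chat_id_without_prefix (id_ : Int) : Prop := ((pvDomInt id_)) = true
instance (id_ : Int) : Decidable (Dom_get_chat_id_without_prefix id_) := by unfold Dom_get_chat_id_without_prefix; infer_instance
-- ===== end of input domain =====

-- B replaces A's digit-stripping loop by reading the digit count off str(-id_) and
-- doing a single divmod at the matching power of ten; no per-digit loop remains.

-- ===== PORT A =====
-- A's while loop: state (id_with_prefix, multiplier); the assignment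
-- id_with_prefix = -(id_with_prefix // -10) is inlined; hitting -100 returns via the
-- while-else, hitting 0 breaks and falls through to `return id_`.
-- The `if h : _.natAbs < _.natAbs` guard only makes the recursion total; it holds on
-- every reachable state (x < 0 after a step that did not reach 0).
def pvLoopA (id_ x mult : Int) : Int :=
  if x = -100 then -100 * mult - id_
  else if -(PySem.Int.floordiv x (-10)) = 0 then id_
  else if h : (-(PySem.Int.floordiv x (-10))).natAbs < x.natAbs then
    pvLoopA id_ (-(PySem.Int.floordiv x (-10))) (mult * 10)
  else id_
termination_by x.natAbs
decreasing_by exact h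

def get_chat_id_without_prefix (id_ : Int) : Int :=
  if id_ ≤ -1000 then pvLoopA id_ id_ 1 else id_

-- ===== PORT B =====
-- Transliteration of Source B: n = -id_; p = 10 ** (len(str(n)) - 3);
-- head, rest = divmod(n, p); return rest if head == 100 else id_.
-- len(str(n)) is (PySem.Int.toChars n).length; the exponent is the same Nat since
-- len(str(n)) ≥ 4 whenever id_ ≤ -1000.  Python's divmod raises only for p = 0,
-- which cannot happen here; the `none` branch only makes the match total.
def get_chat_id_without_prefix_alt (id_ : Int) : Int :=
  if id_ ≤ -1000 then
    let n : Int := -id_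
    let p : Int := (10 : Int) ^ ((PySem.Int.toChars n).length - 3)
    match PySem.Int.divmod? n p with
    | some (head, rest) => if head = 100 then rest else id_
    | none => id_
  else id_

-- ===== PRECONDITION & SPEC =====
def Spec_get_chat_id_without_prefix (id_ : Int) (out : Int) : Prop := out = get_chat_id_without_prefix_alt id_
instance (id_ : Int) (out : Int) : Decidable (Spec_get_chat_id_without_prefix id_ out) := by unfold Spec_get_chat_id_without_prefix; infer_instance

-- ===== CLAIM (what is proved, stated in full; the proofs are below) =====
def Claim_equal_get_chat_id_without_prefix : Prop := ∀ (id_ : Int), Dom_get_chat_id_without_prefix id_ → Spec_get_chat_id_without_prefix id_ (get_chat_id_without_prefix id_)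

-- ===== LEMMAS AND PROOFS =====

-- Exact length of Nat.toDigits 10: the decimal digit count, log₁₀ n + 1.
lemma pvToDigitsCore_len : ∀ (f : Nat), ∀ (n : Nat) (l : List Char), n < f →
    (Nat.toDigitsCore 10 f n l).length = Nat.log 10 n + 1 + l.length := by
  intro f
  induction f with
  | zero => intro n l h; omega
  | succ f ih =>
    intro n l h
    rw [Nat.toDigitsCore]
    by_cases hq : n / 10 = 0
    · rw [if_pos hq]
      have : Nat.log 10 n = 0 := Nat.log_eq_zero_iff.mpr (Or.inl (by omega))
      simp [this]; omega
    · rw [if_neg hq]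
      have h10 : 10 ≤ n := by omega
      have hlt : n / 10 < n := Nat.div_lt_self (by omega) (by omega)
      rw [ih (n / 10) _ (by omega)]
      have hdiv := Nat.log_div_base 10 n
      have hpos : 0 < Nat.log 10 n := Nat.log_pos (by omega) h10
      simp only [List.length_cons]
      omega

lemma pvToChars_len (n : Int) (hn : 0 < n) :
    (PySem.Int.toChars n).length = Nat.log 10 n.toNat + 1 := by
  rw [PySem.Int.toChars, if_neg (by omega), Nat.toDigits]
  simpa using pvToDigitsCore_len (n.toNat + 1) n.toNat [] (by omega)

-- One step of A's digit stripping on x = -m (m > 0) yields -(m / 10).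
lemma pvStepA (m : Int) : -(PySem.Int.floordiv (-m) (-10)) = -(m / 10) := by
  rw [PySem.Int.floordiv_neg_neg, PySem.Int.floordiv_eq_ediv_of_pos (by omega)]

-- A's loop on a two-digit-or-less magnitude falls through and returns id_.
lemma pvLoopA_small (n : Int) : ∀ (K : Nat) (m p : Int), m.toNat = K →
    1 ≤ m → m ≤ 99 → pvLoopA (-n) (-m) p = -n := by
  intro K
  induction K using Nat.strong_induction_on with
  | _ K ih =>
  intro m p hK hm1 hm99
  rw [pvLoopA, if_neg (by omega)]
  simp only [pvStepA]
  by_cases hz : m / 10 = 0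
  · rw [if_pos (by omega)]
  · have hm10 : 10 ≤ m := by omega
    have hq1 : 1 ≤ m / 10 := by omega
    have hq9 : m / 10 ≤ 9 := by omega
    rw [if_neg (by omega), dif_pos (by omega)]
    exact ih (m / 10).toNat (by omega) (m / 10) (p * 10) rfl hq1 (by omega)

-- Core invariant: from state (-m, p) with m = n / p ≥ 100 (p a positive power of
-- ten), A's loop returns n - 100·Q when the decimal expansion of m starts with
-- 100 — where Q = p·10^(log₁₀ m − 2) is the power of ten aligning '100' with the
-- top of n — and id_ otherwise.
lemma pvLoopA_main (n : Int) : ∀ (K : Nat) (m p : Int), m.toNat = K →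
    100 ≤ m → 0 < p → m * p ≤ n → n < (m + 1) * p →
    pvLoopA (-n) (-m) p =
      (if 100 * (p * 10 ^ (Nat.log 10 m.toNat - 2)) ≤ n ∧
          n < 101 * (p * 10 ^ (Nat.log 10 m.toNat - 2))
       then n - 100 * (p * 10 ^ (Nat.log 10 m.toNat - 2)) else -n) := by
  intro K
  induction K using Nat.strong_induction_on with
  | _ K ih =>
  intro m p hK hm hp hlow hhigh
  by_cases h100 : m = 100
  · subst h100
    have hlog : Nat.log 10 (100 : Int).toNat = 2 := by decide
    rw [pvLoopA, if_pos rfl, hlog]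
    simp only [show (2:Nat) - 2 = 0 from rfl, pow_zero, mul_one]
    rw [if_pos ⟨by linarith, by linarith⟩]
    ring_nf
  · have hm101 : 101 ≤ m := by omega
    rw [pvLoopA, if_neg (by omega)]
    simp only [pvStepA]
    have hq10 : 10 ≤ m / 10 := by omega
    have hstep : 10 * (m / 10) ≤ m ∧ m ≤ 10 * (m / 10) + 9 := by omega
    rw [if_neg (by omega), dif_pos (by omega)]
    by_cases hbig : 100 ≤ m / 10
    · have hm1000 : 1000 ≤ m := by omega
      have hb1 : (m / 10) * (p * 10) ≤ n := by nlinarith [hstep.1]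
      have hb2 : n < ((m / 10) + 1) * (p * 10) := by nlinarith [hstep.2]
      have hrec := ih (m / 10).toNat (by omega) (m / 10) (p * 10) rfl hbig (by omega) hb1 hb2
      rw [hrec]
      have hlog3 : 3 ≤ Nat.log 10 m.toNat :=
        (Nat.le_log_iff_pow_le (by omega) (by omega : m.toNat ≠ 0)).mpr
          (by norm_num; omega)
      have hdiv : Nat.log 10 (m / 10).toNat = Nat.log 10 m.toNat - 1 := by
        have h1 : (m / 10).toNat = m.toNat / 10 := by omega
        rw [h1]; exact Nat.log_div_base 10 m.toNat
      have hQ : (p * 10) * 10 ^ (Nat.log 10 (m / 10).toNat - 2)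
          = p * 10 ^ (Nat.log 10 m.toNat - 2) := by
        rw [hdiv]
        have h2 : Nat.log 10 m.toNat - 2 = (Nat.log 10 m.toNat - 1 - 2) + 1 := by omega
        rw [h2, pow_succ]; ring
      rw [hQ]
    · -- 101 ≤ m ≤ 999: the loop can no longer hit 100; both sides give id_.
      have hm999 : m ≤ 999 := by omega
      rw [pvLoopA_small n (m / 10).toNat (m / 10) (p * 10) rfl (by omega) (by omega)]
      have hlog2 : Nat.log 10 m.toNat = 2 := by
        rw [Nat.log_eq_iff (Or.inl (by omega))]
        constructor <;> [omega; omega]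
      rw [hlog2]
      simp only [show (2:Nat) - 2 = 0 from rfl, pow_zero, mul_one]
      rw [if_neg (by rintro ⟨-, h2⟩; nlinarith)]

-- ===== VERDICT (by name: the statement is the Claim_ definition above) =====
theorem get_chat_id_without_prefix_spec : Claim_equal_get_chat_id_without_prefix := by
  intro id_ _
  unfold Spec_get_chat_id_without_prefix get_chat_id_without_prefix get_chat_id_without_prefix_alt
  by_cases h : id_ ≤ -1000
  · rw [if_pos h, if_pos h]
    show pvLoopA id_ id_ 1 =
      (match PySem.Int.divmod? (-id_) ((10 : Int) ^ ((PySem.Int.toChars (-id_)).length - 3)) with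
       | some (head, rest) => if head = 100 then rest else id_
       | none => id_)
    have hn1000 : (1000 : Int) ≤ -id_ := by omega
    have hlog3 : 3 ≤ Nat.log 10 (-id_).toNat :=
      (Nat.le_log_iff_pow_le (by omega) (by omega : (-id_).toNat ≠ 0)).mpr
        (by norm_num; omega)
    -- B's exponent is log₁₀(-id_) − 2
    have hlen : (PySem.Int.toChars (-id_)).length - 3 = Nat.log 10 (-id_).toNat - 2 := by
      rw [pvToChars_len _ (by omega)]; omega
    rw [hlen]
    set Q : Int := (10 : Int) ^ (Nat.log 10 (-id_).toNat - 2) with hQdef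
    have hQpos : 0 < Q := by positivity
    -- A's side via the loop invariant at (m, p) = (-id_, 1)
    have hA := pvLoopA_main (-id_) (-id_).toNat (-id_) 1 rfl (by omega) one_pos
      (by rw [mul_one]) (by rw [mul_one]; omega)
    simp only [neg_neg, one_mul] at hA
    rw [hA, ← hQdef]
    have hdm : PySem.Int.divmod? (-id_) Q
        = some (PySem.Int.floordiv (-id_) Q, PySem.Int.mod (-id_) Q) := by
      rw [PySem.Int.divmod?, if_neg (by omega : ¬Q = 0)]; rfl
    rw [hdm]
    show _ = (if PySem.Int.floordiv (-id_) Q = 100 then PySem.Int.mod (-id_) Q else id_)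
    by_cases hc : 100 * Q ≤ -id_ ∧ -id_ < 101 * Q
    · rw [if_pos hc]
      have hfd : PySem.Int.floordiv (-id_) Q = 100 :=
        (PySem.Int.floordiv_eq_iff_of_pos hQpos).mpr ⟨by linarith [hc.1], by linarith [hc.2]⟩
      rw [hfd, if_pos rfl]
      rw [hQdef]
      have hed : -id_ / Q = 100 := by
        rw [← PySem.Int.floordiv_eq_ediv_of_pos hQpos]; exact hfd
      rw [PySem.Int.mod_eq_emod_of_pos hQpos, Int.emod_def, hed]; ring
    · rw [if_neg hc]
      have hfd : PySem.Int.floordiv (-id_) Q ≠ 100 := by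
        intro hEq
        exact hc ((PySem.Int.floordiv_eq_iff_of_pos hQpos).mp hEq |>.imp
          (fun h1 => by linarith) (fun h2 => by linarith))
      rw [if_neg hfd]
  · rw [if_neg h, if_neg h]
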